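-- pv_equiv track=rewrite | github.com/GunwooPar/hancode | classification_ex.py | format_text_for_display
-- ===== SOURCE A (Python) =====
-- def format_text_for_display(input_text: str, problem_text: str) -> str:
--     """사용자 입력과 정답을 비교하여 색깔있는 문자열로 만듭니다."""
--     result = ""
--     for i in range(len(problem_text)):
--         if i < len(input_text):
--             if input_text[i] == problem_text[i]:
--                 result += f"\033[32m{input_text[i]}\033[0m"  # 초록색
--             else:
--                 result += f"\033[41m{problem_text[i]}\033[0m"  # 빨간 배경
--         else:
--             result += f"\033[90m{problem_text[i]}\033[0m"  # 회색 (아직 입력 안 함)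
--     return result
-- ===== SOURCE B (Python) =====
-- def format_text_for_display(input_text: str, problem_text: str) -> str:
--     """사용자 입력과 정답을 비교하여 색깔있는 문자열로 만듭니다."""
--     m = len(input_text)
--
--     def chunk(i):
--         if i < m:
--             if input_text[i] == problem_text[i]:
--                 return f"\033[32m{input_text[i]}\033[0m"  # green
--             return f"\033[41m{problem_text[i]}\033[0m"  # red background
--         return f"\033[90m{problem_text[i]}\033[0m"  # gray: not typed yet
--
--     def go(lo, hi):
--         # divide and conquer over the index interval [lo, hi)
--         if hi - lo == 0:
--             return ""
--         if hi - lo == 1: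
--             return chunk(lo)
--         mid = (lo + hi) // 2
--         return go(lo, mid) + go(mid, hi)
--
--     return go(0, len(problem_text))
-- ===== Notes on version B (the rewrite author's own statement) =====
-- stated objective: alternative
-- what changed: Replaces A's left-to-right index loop with quadratic string accumulation by a divide-and-conquer over the index interval [0, n): the interval is split at the midpoint, the halves are formatted recursively (recursion depth O(log n)) and concatenated; single characters are the base case.
import Mathlib
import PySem

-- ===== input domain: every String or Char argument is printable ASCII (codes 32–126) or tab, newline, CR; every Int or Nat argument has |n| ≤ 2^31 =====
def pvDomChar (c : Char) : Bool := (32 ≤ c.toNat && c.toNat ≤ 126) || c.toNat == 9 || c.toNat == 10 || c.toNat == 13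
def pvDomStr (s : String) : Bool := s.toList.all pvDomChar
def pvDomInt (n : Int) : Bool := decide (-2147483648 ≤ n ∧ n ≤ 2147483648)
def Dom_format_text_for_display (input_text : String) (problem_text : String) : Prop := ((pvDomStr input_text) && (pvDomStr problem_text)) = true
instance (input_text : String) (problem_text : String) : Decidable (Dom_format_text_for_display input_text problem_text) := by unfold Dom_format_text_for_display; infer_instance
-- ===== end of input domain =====

-- B formats by divide-and-conquer over the index interval instead of A's left-to-right index loop with a string accumulator; objective: alternative.

-- ===== PORT A =====
def goA (ip pp : List Char) (i : Nat) (result : String) : String :=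
  if h : i < pp.length then
    let step :=
      if hi : i < ip.length then
        if ip[i] == pp[i] then "\x1b[32m".push ip[i] ++ "\x1b[0m"
        else "\x1b[41m".push pp[i] ++ "\x1b[0m"
      else "\x1b[90m".push pp[i] ++ "\x1b[0m"
    goA ip pp (i+1) (result ++ step)
  else result
termination_by pp.length - i

def format_text_for_display (input_text : String) (problem_text : String) : String :=
  goA input_text.toList problem_text.toList 0 ""

-- ===== PORT B =====
def chunkB (ip pp : List Char) (i : Nat) : String :=
  if i < ip.length then
    if ip.getD i ' ' == pp.getD i ' ' then "\x1b[32m".push (ip.getD i ' ') ++ "\x1b[0m"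
    else "\x1b[41m".push (pp.getD i ' ') ++ "\x1b[0m"
  else "\x1b[90m".push (pp.getD i ' ') ++ "\x1b[0m"

def goB (ip pp : List Char) (lo hi : Nat) : String :=
  if hi - lo = 0 then ""
  else if hi - lo = 1 then chunkB ip pp lo
  else goB ip pp lo ((lo + hi) / 2) ++ goB ip pp ((lo + hi) / 2) hi
termination_by hi - lo
decreasing_by all_goals omega

def format_text_for_display_alt (input_text : String) (problem_text : String) : String :=
  goB input_text.toList problem_text.toList 0 problem_text.toList.length

-- ===== PRECONDITION & SPEC =====
def Spec_format_text_for_display (input_text : String) (problem_text : String) (out : String) : Prop := out = format_text_for_display_alt input_text problem_text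
instance (input_text : String) (problem_text : String) (out : String) : Decidable (Spec_format_text_for_display input_text problem_text out) := by unfold Spec_format_text_for_display; infer_instance

-- ===== CLAIM (what is proved, stated in full; the proofs are below) =====
def Claim_equal_format_text_for_display : Prop := ∀ (input_text : String) (problem_text : String), Dom_format_text_for_display input_text problem_text → Spec_format_text_for_display input_text problem_text (format_text_for_display input_text problem_text)

-- ===== LEMMAS AND PROOFS =====
lemma foldl_append_init (l : List String) (a : String) :
    l.foldl (· ++ ·) a = a ++ l.foldl (· ++ ·) "" := by
  induction l generalizing a with
  | nil => simp
  | cons x xs ih => simp only [List.foldl_cons]; rw [ih (a ++ x), ih ("" ++ x)]; simp [String.append_assoc]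

lemma join_cons (a : String) (l : List String) : String.join (a :: l) = a ++ String.join l := by
  simp only [String.join, List.foldl_cons]
  rw [foldl_append_init l ("" ++ a)]
  simp

lemma join_append (l₁ l₂ : List String) :
    String.join (l₁ ++ l₂) = String.join l₁ ++ String.join l₂ := by
  induction l₁ with
  | nil => simp [String.join]
  | cons a as ih => simp [join_cons, ih, String.append_assoc]

-- the canonical value both ports compute: the joined per-index chunks of [lo, lo+n)
def seg (ip pp : List Char) (lo n : Nat) : String :=
  String.join ((List.range' lo n).map (chunkB ip pp))

lemma goB_eq (ip pp : List Char) : ∀ n lo hi, hi - lo = n →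
    goB ip pp lo hi = seg ip pp lo n := by
  intro n
  induction n using Nat.strong_induction_on with
  | _ n IH =>
    intro lo hi hn
    rw [goB]
    by_cases h0 : hi - lo = 0
    · simp [h0, ← hn, seg, String.join]
    · by_cases h1 : hi - lo = 1
      · simp [h1, ← hn, seg, String.join]
      · simp only [h0, h1, if_false]
        set mid := (lo + hi) / 2 with hmid
        have hlt1 : mid - lo < n := by omega
        have hlt2 : hi - mid < n := by omega
        rw [IH _ hlt1 lo mid rfl, IH _ hlt2 mid hi rfl]
        unfold seg
        rw [← join_append, ← List.map_append]
        have : List.range' lo (mid - lo) ++ List.range' mid (hi - mid)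
             = List.range' lo n := by
          have h2 := @List.range'_append_1 lo (mid - lo) (hi - mid)
          rw [show lo + (mid - lo) = mid by omega] at h2
          rw [h2, show (mid - lo) + (hi - mid) = n by omega]
        rw [this]

lemma goA_eq (ip pp : List Char) : ∀ i r,
    goA ip pp i r = r ++ seg ip pp i (pp.length - i) := by
  intro i
  induction hn : pp.length - i using Nat.strong_induction_on generalizing i with
  | _ n IH =>
    intro r
    rw [goA]
    by_cases h : i < pp.length
    · simp only [h, dif_pos]
      rw [IH (pp.length - (i+1)) (by omega) (i+1) rfl]
      have hrange : List.range' i n = i :: List.range' (i+1) (pp.length - (i+1)) := by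
        rw [← hn]
        rw [show pp.length - i = (pp.length - (i+1)) + 1 by omega]
        rfl
      have hstep : (if hi : i < ip.length then
          if ip[i] == pp[i] then "\x1b[32m".push ip[i] ++ "\x1b[0m"
          else "\x1b[41m".push pp[i] ++ "\x1b[0m"
        else "\x1b[90m".push pp[i] ++ "\x1b[0m") = chunkB ip pp i := by
        unfold chunkB
        by_cases hi : i < ip.length
        · simp [hi, List.getD, List.getElem?_eq_getElem h]
        · simp [hi, List.getD, List.getElem?_eq_getElem h]
      have hseg : seg ip pp i n = chunkB ip pp i ++ seg ip pp (i+1) (pp.length - (i+1)) := by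
        rw [seg, hrange]; simp only [List.map_cons]; rw [join_cons]; rfl
      rw [hseg, hstep, String.append_assoc]
    · have : n = 0 := by omega
      simp [h, this, seg, String.join]

-- ===== VERDICT (by name: the statement is the Claim_ definition above) =====
theorem format_text_for_display_spec : Claim_equal_format_text_for_display := by
  intro input_text problem_text _
  unfold Spec_format_text_for_display format_text_for_display format_text_for_display_alt
  rw [goA_eq, goB_eq _ _ (problem_text.toList.length - 0) 0 problem_text.toList.length rfl]
  simp
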